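-- pv_equiv track=rewrite | github.com/Reppin-Dev/scraper-agent | backend/src/services/sitemap_discovery.py | _extract_all_sitemaps_from_robots
-- ===== SOURCE A (Python) =====
-- from typing import List, Set, Optional
--
-- def _extract_all_sitemaps_from_robots(robots_content: str) -> List[str]:
--     """Extract ALL sitemap URLs from robots.txt.
--
--     Args:
--         robots_content: Contents of robots.txt
--
--     Returns:
--         List of sitemap URLs found in robots.txt
--     """
--     sitemap_urls = []
--     for line in robots_content.split('\n'):
--         line = line.strip()
--         if line.lower().startswith('sitemap:'):
--             # Split on first colon only, in case URL contains colons
--             sitemap_url = line.split(':', 1)[1].strip()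
--             if sitemap_url:
--                 sitemap_urls.append(sitemap_url)
--     return sitemap_urls
-- ===== SOURCE B (Python) =====
-- _KEY = 'sitemap:'
--
--
-- def _extract_all_sitemaps_from_robots(robots_content: str):
--     """Single-pass character scanner: walks the text once, matching the
--     'sitemap:' keyword case-insensitively in place and slicing the URL out,
--     without building a list of lines or intermediate stripped strings."""
--     urls = []
--     n = len(robots_content)
--     i = 0
--     while i < n:
--         # skip the line's leading whitespace
--         while i < n and robots_content[i] in ' \t\r':
--             i += 1
--         # case-insensitive in-place match of 'sitemap:'
--         k = 0
--         while k < 8 and i + k < n and robots_content[i + k].lower() == _KEY[k]: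
--             k += 1
--         if k == 8:
--             # URL starts after the colon and any whitespace
--             j = i + 8
--             while j < n and robots_content[j] in ' \t\r':
--                 j += 1
--             # walk to end of line, remembering the end of the last non-space run
--             e = j
--             last = j
--             while e < n and robots_content[e] != '\n':
--                 if robots_content[e] not in ' \t\r':
--                     last = e + 1
--                 e += 1
--             if last > j:
--                 urls.append(robots_content[j:last])
--             i = e + 1
--         else:
--             # not a sitemap line: skip to the next line
--             while i < n and robots_content[i] != '\n':
--                 i += 1
--             i += 1
--     return urls
-- ===== Notes on version B (the rewrite author's own statement) =====
-- stated objective: alternative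
-- what changed: Replaced A's split-into-lines-then-per-line string-method pipeline (strip, lowercase, prefix test, bounded split on the first colon) with a single-pass character-level scanner that skips whitespace, matches the sitemap keyword case-insensitively in place and slices the URL out while walking the text once.
import Mathlib
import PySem

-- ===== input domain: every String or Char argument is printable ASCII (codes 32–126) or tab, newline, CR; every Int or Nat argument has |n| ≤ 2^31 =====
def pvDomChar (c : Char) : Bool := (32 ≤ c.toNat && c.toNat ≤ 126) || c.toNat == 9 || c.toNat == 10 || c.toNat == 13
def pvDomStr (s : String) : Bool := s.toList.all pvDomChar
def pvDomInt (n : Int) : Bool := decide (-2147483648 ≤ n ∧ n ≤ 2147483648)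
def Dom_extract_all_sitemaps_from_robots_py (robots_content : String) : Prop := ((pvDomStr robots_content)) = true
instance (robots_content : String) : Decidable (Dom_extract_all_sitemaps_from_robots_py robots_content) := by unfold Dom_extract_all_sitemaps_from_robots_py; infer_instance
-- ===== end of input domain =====

-- B replaces A's per-line split/strip/lower/startswith pipeline with a single-pass
-- character-level scanner (objective: alternative, similar cost).

-- ===== PORT A =====
-- loop body of A's for-loop (same state: the accumulated url list)
def pvALine (sitemap_urls : List String) (line : List Char) : List String :=
  let line' := PySem.Chars.strip line
  if PySem.Chars.startswith (PySem.Chars.lower line') ['s','i','t','e','m','a','p',':'] then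
    let sitemap_url := PySem.Chars.strip ((PySem.Chars.splitOnMax line' [':'] 1).getD 1 [])
    if sitemap_url.isEmpty then sitemap_urls else sitemap_urls ++ [String.ofList sitemap_url]
  else sitemap_urls

def extract_all_sitemaps_from_robots_py (robots_content : String) : List String :=
  (PySem.Chars.splitOn robots_content.toList ['\n']).foldl pvALine []

-- ===== PORT B =====
def pvKEY : List Char := ['s','i','t','e','m','a','p',':']

def pvIsWS (c : Char) : Bool := c == ' ' || c == '\t' || c == '\r'

-- the "skip whitespace" while-loops of Source B
def pvSkipWS : List Char → List Char
  | [] => []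
  | c :: cs => if pvIsWS c then pvSkipWS cs else c :: cs

-- the case-insensitive keyword-matching while-loop; some rest ↔ k reached 8
def pvMatchKey : List Char → List Char → Option (List Char)
  | [], cs => some cs
  | _ :: _, [] => none
  | k :: ks, c :: cs => if PySem.Chars.lowerChar c == k then pvMatchKey ks cs else none

-- the scan-to-end-of-line loop tracking `last`: returns (url up to the last
-- non-whitespace run, rest of the input after the newline)
def pvScanUrl : List Char → List Char × List Char
  | [] => ([], [])
  | c :: cs =>
    if c == '\n' then ([], cs)
    else
      let p := pvScanUrl cs
      if pvIsWS c && p.1.isEmpty then p else (c :: p.1, p.2)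

-- the skip-to-next-line while-loop
def pvDropLine : List Char → List Char
  | [] => []
  | c :: cs => if c == '\n' then cs else pvDropLine cs

-- termination facts for pvBLoop (cited in decreasing_by)
theorem pvSkipWS_length_le (l : List Char) : (pvSkipWS l).length ≤ l.length := by
  induction l with
  | nil => simp [pvSkipWS]
  | cons c cs ih => simp only [pvSkipWS]; split <;> simp <;> omega

theorem pvMatchKey_some_length : ∀ (ks l r : List Char), pvMatchKey ks l = some r →
    r.length + ks.length = l.length := by
  intro ks
  induction ks with
  | nil => intro l r h; simp [pvMatchKey] at h; simp [h]
  | cons k ks ih =>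
    intro l r h
    cases l with
    | nil => simp [pvMatchKey] at h
    | cons c cs =>
      simp only [pvMatchKey] at h
      split at h
      · have := ih cs r h; simp; omega
      · exact absurd h (by simp)

theorem pvScanUrl_snd_length_le (l : List Char) : (pvScanUrl l).2.length ≤ l.length := by
  induction l with
  | nil => simp [pvScanUrl]
  | cons c cs ih => simp only [pvScanUrl]; split <;> [simp; split] <;> simp <;> omega

theorem pvDropLine_length_lt : ∀ (l : List Char), l ≠ [] → (pvDropLine l).length < l.length := by
  intro l
  induction l with
  | nil => simp
  | cons c cs ih =>
    intro _
    simp only [pvDropLine]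
    split
    · simp
    · rcases cs with _ | ⟨d, ds⟩
      · simp [pvDropLine]
      · have := ih (by simp); simpa using Nat.lt_succ_of_lt this

def pvBLoop (cs : List Char) : List String :=
  if hcs : cs = [] then []
  else
    match hm : pvMatchKey pvKEY (pvSkipWS cs) with
    | some afterKey =>
      let p := pvScanUrl (pvSkipWS afterKey)
      (if p.1.isEmpty then [] else [String.ofList p.1]) ++ pvBLoop p.2
    | none => pvBLoop (pvDropLine (pvSkipWS cs))
termination_by cs.length
decreasing_by
  · have h1 := pvScanUrl_snd_length_le (pvSkipWS afterKey)
    have h2 := pvSkipWS_length_le afterKey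
    have h3 := pvMatchKey_some_length _ _ _ hm
    have h4 := pvSkipWS_length_le cs
    simp [pvKEY] at h3
    omega
  · have h4 := pvSkipWS_length_le cs
    by_cases h : pvSkipWS cs = []
    · rw [h]; simp [pvDropLine]
      exact List.length_pos_iff.mpr hcs
    · have := pvDropLine_length_lt _ h
      omega

def extract_all_sitemaps_from_robots_py_alt (robots_content : String) : List String :=
  pvBLoop robots_content.toList

-- ===== PRECONDITION & SPEC =====
def Spec_extract_all_sitemaps_from_robots_py (robots_content : String) (out : List String) : Prop := out = extract_all_sitemaps_from_robots_py_alt robots_content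
instance (robots_content : String) (out : List String) : Decidable (Spec_extract_all_sitemaps_from_robots_py robots_content out) := by unfold Spec_extract_all_sitemaps_from_robots_py; infer_instance

-- ===== CLAIM (what is proved, stated in full; the proofs are below) =====
def Claim_equal_extract_all_sitemaps_from_robots_py : Prop := ∀ (robots_content : String), Dom_extract_all_sitemaps_from_robots_py robots_content → Spec_extract_all_sitemaps_from_robots_py robots_content (extract_all_sitemaps_from_robots_py robots_content)

-- ===== LEMMAS AND PROOFS =====

-- character-level facts
theorem pvToNat_inj (c d : Char) : c = d ↔ c.toNat = d.toNat :=
  ⟨fun h => h ▸ rfl, fun h => Char.ext (by exact UInt32.toNat_inj.mp h)⟩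

theorem pvLe_iff (c d : Char) : (c ≤ d) ↔ c.toNat ≤ d.toNat := by
  simp [Char.le_def, UInt32.le_iff_toNat_le]

theorem pvIsWS_eq_isspace (c : Char) (hd : pvDomChar c = true) (hn : c ≠ '\n') :
    pvIsWS c = PySem.Chars.isspace c := by
  simp only [pvDomChar, Bool.or_eq_true, Bool.and_eq_true, decide_eq_true_eq, beq_iff_eq] at hd
  rw [ne_eq, pvToNat_inj] at hn
  rw [Bool.eq_iff_iff]
  simp only [pvIsWS, PySem.Chars.isspace, beq_iff_eq, pvToNat_inj,
    Bool.or_eq_true, Bool.and_eq_true, decide_eq_true_eq]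
  have h1 : (' ' : Char).toNat = 32 := by decide
  have h2 : ('\t' : Char).toNat = 9 := by decide
  have h3 : ('\r' : Char).toNat = 13 := by decide
  have h4 : ('\n' : Char).toNat = 10 := by decide
  rw [h1, h2, h3]; rw [h4] at hn
  constructor <;> intro h <;> omega

theorem pvIsspace_lowerChar (c : Char) :
    PySem.Chars.isspace (PySem.Chars.lowerChar c) = PySem.Chars.isspace c := by
  simp only [PySem.Chars.lowerChar]
  split
  · next h =>
    simp only [PySem.Chars.isupper, Bool.and_eq_true, decide_eq_true_eq, pvLe_iff] at h
    have ha : ('A' : Char).toNat = 65 := by decide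
    have hz : ('Z' : Char).toNat = 90 := by decide
    rw [ha] at h; rw [hz] at h
    have hv : (c.toNat + 32).isValidChar := by
      left; show c.toNat + 32 < 55296; omega
    have ht : (Char.ofNat (c.toNat + 32)).toNat = c.toNat + 32 := by
      rw [Char.toNat_ofNat, if_pos hv]
    rw [Bool.eq_iff_iff]
    simp only [PySem.Chars.isspace, ht, Bool.or_eq_true, Bool.and_eq_true, decide_eq_true_eq]
    constructor <;> intro h' <;> omega
  · rfl

theorem pvLowerChar_eq_colon (c : Char) (h : PySem.Chars.lowerChar c = ':') : c = ':' := by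
  simp only [PySem.Chars.lowerChar] at h
  split at h
  · next hu =>
    simp only [PySem.Chars.isupper, Bool.and_eq_true, decide_eq_true_eq, pvLe_iff] at hu
    have ha : ('A' : Char).toNat = 65 := by decide
    have hz : ('Z' : Char).toNat = 90 := by decide
    rw [ha] at hu; rw [hz] at hu
    rw [pvToNat_inj] at h
    have hv : (c.toNat + 32).isValidChar := by left; show c.toNat + 32 < 55296; omega
    rw [Char.toNat_ofNat, if_pos hv] at h
    have hc : (':' : Char).toNat = 58 := by decide
    rw [hc] at h; omega
  · exact h

-- B-side proof helper: what the `last`-tracking loop computes on a newline-free block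
def pvRstripWS (l : List Char) : List Char := (pvSkipWS l.reverse).reverse

-- per-line value shared by both sides in the proofs
def pvHandleLine (t : List Char) : List String :=
  (pvMatchKey pvKEY (pvSkipWS t)).elim []
    (fun ak => if (pvRstripWS (pvSkipWS ak)).isEmpty then []
               else [String.ofList (pvRstripWS (pvSkipWS ak))])

theorem pvSkipWS_subset : ∀ (l : List Char), ∀ c ∈ pvSkipWS l, c ∈ l := by
  intro l
  induction l with
  | nil => simp [pvSkipWS]
  | cons a as ih =>
    intro c hc
    simp only [pvSkipWS] at hc
    split at hc
    · exact List.mem_cons_of_mem a (ih c hc)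
    · exact hc

theorem pvSkipWS_append (t r : List Char) :
    pvSkipWS (t ++ r) = if (pvSkipWS t).isEmpty then pvSkipWS r else pvSkipWS t ++ r := by
  induction t with
  | nil => simp [pvSkipWS]
  | cons a as ih =>
    simp only [List.cons_append, pvSkipWS]
    split
    · exact ih
    · simp

theorem pvSkipWS_append_nl (x r : List Char) :
    pvSkipWS (x ++ '\n' :: r) = pvSkipWS x ++ '\n' :: r := by
  rw [pvSkipWS_append]
  by_cases h : pvSkipWS x = []
  · have hnl : pvSkipWS ('\n' :: r) = '\n' :: r := by
      simp only [pvSkipWS]; rw [if_neg (by decide)]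
    simp [h, hnl]
  · rw [if_neg (by simpa using h)]

theorem pvSkipWS_eq_lstrip : ∀ (t : List Char), (∀ c ∈ t, pvDomChar c = true) → ('\n' ∉ t) →
    pvSkipWS t = PySem.Chars.lstrip t := by
  intro t
  induction t with
  | nil => intro _ _; rfl
  | cons a as ih =>
    intro hd hn
    have ha : pvIsWS a = PySem.Chars.isspace a :=
      pvIsWS_eq_isspace a (hd a (by simp)) (by rintro rfl; exact hn (by simp))
    simp only [pvSkipWS, PySem.Chars.lstrip, List.dropWhile_cons, ha]
    split
    · exact ih (fun c hc => hd c (by simp [hc])) (fun h => hn (by simp [h]))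
    · rfl

theorem pvRstripWS_eq_rstrip (t : List Char) (hd : ∀ c ∈ t, pvDomChar c = true)
    (hn : '\n' ∉ t) : pvRstripWS t = PySem.Chars.rstrip t := by
  unfold pvRstripWS PySem.Chars.rstrip
  rw [pvSkipWS_eq_lstrip t.reverse (fun c hc => hd c (List.mem_reverse.mp hc))
      (fun h => hn (List.mem_reverse.mp h))]
  rfl

theorem pvRstripWS_cons (c : Char) (l : List Char) :
    pvRstripWS (c :: l) = if pvIsWS c && (pvRstripWS l).isEmpty then pvRstripWS l
                          else c :: pvRstripWS l := by
  unfold pvRstripWS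
  rw [List.reverse_cons, pvSkipWS_append]
  by_cases h : pvSkipWS l.reverse = []
  · simp only [h, List.isEmpty_nil, if_pos, List.reverse_nil, Bool.and_true]
    show (pvSkipWS [c]).reverse = _
    simp only [pvSkipWS]
    split <;> simp_all
  · have : (pvSkipWS l.reverse).isEmpty = false := by simpa using h
    simp only [this, Bool.false_eq_true, if_false, List.reverse_append,
      List.reverse_cons, List.reverse_nil, List.nil_append, Bool.and_eq_true]
    split
    · next hws => simp_all
    · rfl

theorem pvScanUrl_no_nl : ∀ (l : List Char), '\n' ∉ l → pvScanUrl l = (pvRstripWS l, []) := by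
  intro l
  induction l with
  | nil => intro _; rfl
  | cons c cs ih =>
    intro hn
    have hc : (c == '\n') = false := by simp; rintro rfl; exact hn (by simp)
    simp only [pvScanUrl, hc, Bool.false_eq_true, if_false]
    rw [ih (fun h => hn (by simp [h]))]
    rw [pvRstripWS_cons]
    split <;> rfl

theorem pvScanUrl_append : ∀ (l : List Char), '\n' ∉ l → ∀ r,
    pvScanUrl (l ++ '\n' :: r) = (pvRstripWS l, r) := by
  intro l
  induction l with
  | nil => intro _ r; simp [pvScanUrl, pvRstripWS, pvSkipWS]
  | cons c cs ih =>
    intro hn r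
    have hc : (c == '\n') = false := by simp; rintro rfl; exact hn (by simp)
    simp only [List.cons_append, pvScanUrl, hc, Bool.false_eq_true, if_false]
    rw [ih (fun h => hn (by simp [h]))]
    rw [pvRstripWS_cons]
    split <;> rfl

theorem pvDropLine_no_nl : ∀ (l : List Char), '\n' ∉ l → pvDropLine l = [] := by
  intro l
  induction l with
  | nil => intro _; rfl
  | cons c cs ih =>
    intro hn
    have hc : (c == '\n') = false := by simp; rintro rfl; exact hn (by simp)
    simp only [pvDropLine, hc, Bool.false_eq_true, if_false]
    exact ih (fun h => hn (by simp [h]))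

theorem pvDropLine_append : ∀ (l : List Char), '\n' ∉ l → ∀ r,
    pvDropLine (l ++ '\n' :: r) = r := by
  intro l
  induction l with
  | nil => intro _ r; simp [pvDropLine]
  | cons c cs ih =>
    intro hn r
    have hc : (c == '\n') = false := by simp; rintro rfl; exact hn (by simp)
    simp only [List.cons_append, pvDropLine, hc, Bool.false_eq_true, if_false]
    exact ih (fun h => hn (by simp [h])) r

theorem pvBLoop_nil : pvBLoop [] = [] := by
  rw [pvBLoop]
  simp

theorem pvMatchKey_eq : ∀ (ks l : List Char),
    pvMatchKey ks l = if ks.isPrefixOf (PySem.Chars.lower l) then some (l.drop ks.length)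
                      else none := by
  intro ks
  induction ks with
  | nil => intro l; simp [pvMatchKey, List.isPrefixOf]
  | cons k ks ih =>
    intro l
    cases l with
    | nil => simp [pvMatchKey, PySem.Chars.lower]
    | cons c cs =>
      have hl : PySem.Chars.lower (c :: cs) = PySem.Chars.lowerChar c :: PySem.Chars.lower cs :=
        rfl
      simp only [pvMatchKey, hl, List.isPrefixOf, ih]
      by_cases h : PySem.Chars.lowerChar c = k
      · subst h
        simp only [beq_self_eq_true, if_true, Bool.true_and, List.length_cons,
          List.drop_succ_cons]
      · have h1 : (PySem.Chars.lowerChar c == k) = false := beq_eq_false_iff_ne.mpr h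
        have h2 : (k == PySem.Chars.lowerChar c) = false :=
          beq_eq_false_iff_ne.mpr (fun h' => h h'.symm)
        simp [h1, h2]

theorem pvPrefix_append_ws : ∀ (a k w : List Char),
    (∀ c ∈ w, PySem.Chars.isspace c = true) → (∀ c ∈ k, PySem.Chars.isspace c = false) →
    k.isPrefixOf (a ++ w) = k.isPrefixOf a := by
  intro a
  induction a with
  | nil =>
    intro k w hw hk
    cases k with
    | nil => simp
    | cons k0 ks =>
      simp only [List.nil_append]
      cases w with
      | nil => rfl
      | cons w0 ws =>
        have : (k0 == w0) = false := by
          refine beq_eq_false_iff_ne.mpr (fun h => ?_)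
          have h1 := hk k0 (by simp)
          have h2 := hw w0 (by simp)
          rw [h] at h1; rw [h1] at h2; exact absurd h2 (by simp)
        simp [List.isPrefixOf, this]
  | cons a0 as ih =>
    intro k w hw hk
    cases k with
    | nil => simp
    | cons k0 ks =>
      simp only [List.cons_append, List.isPrefixOf]
      rw [ih ks w hw (fun c hc => hk c (by simp [hc]))]

theorem pvPrefix_append_nl : ∀ (a k z : List Char), ('\n' ∉ k) →
    k.isPrefixOf (a ++ '\n' :: z) = k.isPrefixOf a := by
  intro a
  induction a with
  | nil =>
    intro k z hk
    cases k with
    | nil => simp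
    | cons k0 ks =>
      have : (k0 == '\n') = false :=
        beq_eq_false_iff_ne.mpr (fun h => hk (by simp [h]))
      simp [List.isPrefixOf, this]
  | cons a0 as ih =>
    intro k z hk
    cases k with
    | nil => simp
    | cons k0 ks =>
      simp only [List.cons_append, List.isPrefixOf]
      rw [ih ks z (fun h => hk (by simp [h]))]

theorem pvRstrip_decomp (x : List Char) : ∃ w, x = PySem.Chars.rstrip x ++ w ∧
    ∀ c ∈ w, PySem.Chars.isspace c = true := by
  refine ⟨(x.reverse.takeWhile PySem.Chars.isspace).reverse, ?_, ?_⟩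
  · conv_lhs => rw [← List.reverse_reverse x, ← List.takeWhile_append_dropWhile
      (p := PySem.Chars.isspace) (l := x.reverse)]
    rw [List.reverse_append]
    rfl
  · intro c hc
    exact List.mem_takeWhile_imp (List.mem_reverse.mp hc)

theorem pvRstrip_append_ws (x w : List Char) (hw : ∀ c ∈ w, PySem.Chars.isspace c = true) :
    PySem.Chars.rstrip (x ++ w) = PySem.Chars.rstrip x := by
  unfold PySem.Chars.rstrip
  rw [List.reverse_append, List.dropWhile_append]
  have : w.reverse.dropWhile PySem.Chars.isspace = [] :=
    List.dropWhile_eq_nil_iff.mpr (fun c hc => hw c (List.mem_reverse.mp hc))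
  simp [this]

theorem pvStrip_append_ws (b w : List Char) (hw : ∀ c ∈ w, PySem.Chars.isspace c = true) :
    PySem.Chars.strip (b ++ w) = PySem.Chars.strip b := by
  unfold PySem.Chars.strip PySem.Chars.lstrip
  rw [List.dropWhile_append]
  by_cases h : b.dropWhile PySem.Chars.isspace = []
  · have hw' : w.dropWhile PySem.Chars.isspace = [] :=
      List.dropWhile_eq_nil_iff.mpr hw
    simp [h, hw']
  · have : (b.dropWhile PySem.Chars.isspace).isEmpty = false := by simpa using h
    simp only [this, Bool.false_eq_true, if_false]
    exact pvRstrip_append_ws _ w hw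

-- splitOnMax with the count exhausted returns the remainder as one piece
theorem pvGoMax_zero : ∀ (f : Nat) (l : List Char) (acc : List (List Char)),
    PySem.Chars.splitOnMax.go [':'] f 0 l [] acc = (l :: acc).reverse := by
  intro f l acc
  rw [PySem.Chars.splitOnMax.go.eq_def]
  match f, l with
  | 0, l => simp
  | Nat.succ f, [] => simp
  | Nat.succ f, c :: rest => simp

theorem pvGoMax_one : ∀ (fuel : Nat) (a rest cur : List Char) (acc : List (List Char)),
    (':' ∉ a) → a.length + rest.length < fuel →
    PySem.Chars.splitOnMax.go [':'] fuel 1 (a ++ ':' :: rest) cur acc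
      = acc.reverse ++ [cur.reverse ++ a, rest] := by
  intro fuel
  induction fuel with
  | zero => intro a rest cur acc _ h; omega
  | succ f ih =>
    intro a rest cur acc ha h
    cases a with
    | nil =>
      rw [PySem.Chars.splitOnMax.go.eq_def]
      simp only [List.nil_append]
      have hpre : List.isPrefixOf [':'] (':' :: rest) = true := by
        simp [List.isPrefixOf]
      simp only [hpre, if_true, one_ne_zero, if_false]
      rw [pvGoMax_zero]
      simp
    | cons a0 as =>
      rw [PySem.Chars.splitOnMax.go.eq_def]
      have h0 : (a0 :: as) ++ ':' :: rest = a0 :: (as ++ ':' :: rest) := rfl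
      simp only [h0]
      have hne : (':' == a0) = false :=
        beq_eq_false_iff_ne.mpr (fun h' => ha (by simp [h'.symm]))
      have hpre : List.isPrefixOf [':'] (a0 :: (as ++ ':' :: rest)) = false := by
        simp [List.isPrefixOf, hne]
      simp only [hpre, Bool.false_eq_true, if_false, one_ne_zero]
      rw [ih as rest (a0 :: cur) acc (fun h' => ha (by simp [h'])) (by simp at h ⊢; omega)]
      simp

theorem pvSplitOnMax_colon (a rest : List Char) (ha : ':' ∉ a) :
    PySem.Chars.splitOnMax (a ++ ':' :: rest) [':'] 1 = [a, rest] := by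
  rw [PySem.Chars.splitOnMax]
  rw [if_neg (by norm_num)]
  have h1 : (1 : Int).toNat = 1 := rfl
  rw [h1, pvGoMax_one _ a rest [] [] ha (by simp)]
  simp

-- the per-line structure of A's split('\n')
def pvLines : List Char → List (List Char)
  | [] => [[]]
  | c :: cs =>
    if c = '\n' then [] :: pvLines cs
    else match pvLines cs with
         | [] => [[c]]
         | t :: r => (c :: t) :: r

theorem pvLines_ne_nil : ∀ (l : List Char), pvLines l ≠ [] := by
  intro l
  induction l with
  | nil => simp [pvLines]
  | cons c cs ih =>
    simp only [pvLines]
    split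
    · simp
    · match h : pvLines cs with
      | [] => simp
      | t :: r => simp

theorem pvLines_no_nl : ∀ (l : List Char), '\n' ∉ l → pvLines l = [l] := by
  intro l
  induction l with
  | nil => intro _; rfl
  | cons c cs ih =>
    intro hn
    have hc : ¬ (c = '\n') := fun h => hn (by simp [h])
    simp only [pvLines, if_neg hc]
    rw [ih (fun h => hn (by simp [h]))]

theorem pvLines_append : ∀ (t : List Char), '\n' ∉ t → ∀ rest,
    pvLines (t ++ '\n' :: rest) = t :: pvLines rest := by
  intro t
  induction t with
  | nil => intro _ rest; simp [pvLines]
  | cons c cs ih =>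
    intro hn rest
    have hc : ¬ (c = '\n') := fun h => hn (by simp [h])
    simp only [List.cons_append, pvLines, if_neg hc]
    rw [ih (fun h => hn (by simp [h])) rest]

theorem pvNlSplit : ∀ (cs : List Char), '\n' ∈ cs →
    ∃ t rest, cs = t ++ '\n' :: rest ∧ '\n' ∉ t := by
  intro cs
  induction cs with
  | nil => simp
  | cons c cs ih =>
    intro h
    by_cases hc : c = '\n'
    · exact ⟨[], cs, by simp [hc], by simp⟩
    · have : '\n' ∈ cs := by
        rcases List.mem_cons.mp h with h' | h'
        · exact absurd h'.symm hc
        · exact h'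
      obtain ⟨t, rest, heq, hnt⟩ := ih this
      exact ⟨c :: t, rest, by simp [heq], by simp [hnt, Ne.symm hc]⟩

theorem pvGo_spec : ∀ (fuel : Nat) (l cur : List Char) (acc : List (List Char)),
    l.length < fuel →
    PySem.Chars.splitOn.go ['\n'] fuel l cur acc
      = acc.reverse ++ (pvLines l).modifyHead (cur.reverse ++ ·) := by
  intro fuel
  induction fuel with
  | zero => intro l cur acc h; omega
  | succ f ih =>
    intro l cur acc h
    rw [PySem.Chars.splitOn.go.eq_def]
    cases l with
    | nil => simp [pvLines]
    | cons c rest =>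
      by_cases hc : c = '\n'
      · subst hc
        have hpre : List.isPrefixOf ['\n'] ('\n' :: rest) = true := by simp [List.isPrefixOf]
        simp only [hpre, if_true]
        have hdrop : List.drop (['\n'] : List Char).length ('\n' :: rest) = rest := rfl
        rw [hdrop, ih rest [] _ (by simp at h ⊢; omega)]
        have hid : ∀ (L : List (List Char)), L.modifyHead (fun x => x) = L := by
          intro L; cases L <;> simp
        simp [pvLines, hid]
      · have hpre : List.isPrefixOf ['\n'] (c :: rest) = false := by
          have : ('\n' == c) = false := beq_eq_false_iff_ne.mpr (fun h' => hc h'.symm)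
          simp [List.isPrefixOf, this]
        simp only [hpre, Bool.false_eq_true, if_false]
        rw [ih rest (c :: cur) acc (by simp at h ⊢; omega)]
        simp only [pvLines, if_neg hc]
        match hr : pvLines rest with
        | [] => exact absurd hr (pvLines_ne_nil rest)
        | t :: r => simp

theorem pvSplitOn_eq_pvLines (s : List Char) :
    PySem.Chars.splitOn s ['\n'] = pvLines s := by
  rw [PySem.Chars.splitOn, pvGo_spec (s.length + 1) s [] [] (by omega)]
  simp only [List.reverse_nil, List.nil_append]
  cases pvLines s <;> simp

-- the per-line equivalence: A's line body computes pvHandleLine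
theorem pvALine_eq (t : List Char) (acc : List String)
    (hd : ∀ c ∈ t, pvDomChar c = true) (hn : ('\n' : Char) ∉ t) :
    pvALine acc t = acc ++ pvHandleLine t := by
  have hu0 : pvSkipWS t = PySem.Chars.lstrip t := pvSkipWS_eq_lstrip t hd hn
  have hd0 : ∀ c ∈ pvSkipWS t, pvDomChar c = true := fun c hc => hd c (pvSkipWS_subset t c hc)
  have hn0 : '\n' ∉ pvSkipWS t := fun h => hn (pvSkipWS_subset t _ h)
  have hstrip : PySem.Chars.strip t = PySem.Chars.rstrip (pvSkipWS t) := by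
    rw [hu0]; rfl
  obtain ⟨w, hw, hws⟩ := pvRstrip_decomp (pvSkipWS t)
  have hkeyws : ∀ c ∈ pvKEY, PySem.Chars.isspace c = false := by
    intro c hc
    fin_cases hc <;> decide
  have hlowws : ∀ c ∈ PySem.Chars.lower w, PySem.Chars.isspace c = true := by
    intro c hc
    obtain ⟨c', hc', rfl⟩ := List.mem_map.mp hc
    rw [pvIsspace_lowerChar]
    exact hws c' hc'
  have hlowapp : PySem.Chars.lower (PySem.Chars.rstrip (pvSkipWS t) ++ w)
      = PySem.Chars.lower (PySem.Chars.rstrip (pvSkipWS t)) ++ PySem.Chars.lower w :=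
    List.map_append ..
  have hbridge : pvKEY.isPrefixOf (PySem.Chars.lower (pvSkipWS t))
      = pvKEY.isPrefixOf (PySem.Chars.lower (PySem.Chars.rstrip (pvSkipWS t))) := by
    conv_lhs => rw [hw]
    rw [hlowapp, pvPrefix_append_ws _ _ _ hlowws hkeyws]
  have hKEY : (['s','i','t','e','m','a','p',':'] : List Char) = pvKEY := rfl
  simp only [pvALine, pvHandleLine, pvMatchKey_eq, PySem.Chars.startswith]
  rw [hKEY, hstrip, hbridge]
  cases hpref : pvKEY.isPrefixOf (PySem.Chars.lower (PySem.Chars.rstrip (pvSkipWS t))) with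
  | true =>
    rw [if_pos rfl, if_pos rfl]
    simp only [Option.elim]
    -- decompose rstrip (pvSkipWS t) = a1 ++ ':' :: b with ':' ∉ a1, a1.length = 7
    have hp : pvKEY <+: PySem.Chars.lower (PySem.Chars.rstrip (pvSkipWS t)) :=
      List.isPrefixOf_iff_prefix.mp hpref
    obtain ⟨z, hz⟩ := hp
    obtain ⟨p8, b, hl, hp8, hb⟩ := List.map_eq_append_iff.mp hz.symm
    have hp8' : List.map PySem.Chars.lowerChar p8 = ['s','i','t','e','m','a','p'] ++ [':'] := hp8
    obtain ⟨a1, a2, hp8e, ha1, ha2⟩ := List.map_eq_append_iff.mp hp8'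
    have ha2' : ∃ c, a2 = [c] ∧ PySem.Chars.lowerChar c = ':' := by
      cases a2 with
      | nil => simp at ha2
      | cons c cc =>
        simp only [List.map_cons, List.cons.injEq] at ha2
        obtain ⟨h1, h2⟩ := ha2
        have : cc = [] := by simpa using congrArg List.length h2
        exact ⟨c, by simp [this], h1⟩
    obtain ⟨c, rfl, hcc⟩ := ha2'
    have hc : c = ':' := pvLowerChar_eq_colon c hcc
    subst hc
    have hcol : ':' ∉ a1 := by
      intro hmem
      have h1 : PySem.Chars.lowerChar ':' ∈ List.map PySem.Chars.lowerChar a1 :=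
        List.mem_map_of_mem hmem
      rw [ha1] at h1
      have h2 : PySem.Chars.lowerChar ':' = ':' := by decide
      rw [h2] at h1
      simp at h1
    have hlab : PySem.Chars.rstrip (pvSkipWS t) = a1 ++ ':' :: b := by
      rw [hl, hp8e]; simp
    rw [hlab, pvSplitOnMax_colon a1 b hcol]
    have hgetD : ([a1, b] : List (List Char)).getD 1 [] = b := rfl
    rw [hgetD]
    -- A's url is strip b; B's url is strip (b ++ w) = strip b
    have hlen : (a1 ++ [':'] : List Char).length = 8 := by
      have : a1.length = 7 := by simpa using congrArg List.length ha1
      simp [this]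
    have hdropASSOC : pvSkipWS t = (a1 ++ [':']) ++ (b ++ w) := by
      conv_lhs => rw [hw, hlab]
      simp
    have hdrop : (pvSkipWS t).drop 8 = b ++ w := by
      rw [hdropASSOC, ← hlen, List.drop_left]
    have hKEYlen : pvKEY.length = 8 := rfl
    rw [hKEYlen, hdrop]
    have hdbw : ∀ c ∈ b ++ w, pvDomChar c = true := by
      intro c hc
      refine hd0 c ?_
      rw [hdropASSOC]
      exact List.mem_append_right _ hc
    have hnbw : '\n' ∉ (b ++ w : List Char) := by
      intro h
      exact hn0 (by rw [hdropASSOC]; exact List.mem_append_right _ h)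
    have hurl : pvRstripWS (pvSkipWS (b ++ w)) = PySem.Chars.strip b := by
      rw [pvRstripWS_eq_rstrip _ (fun c hc => hdbw c (pvSkipWS_subset _ c hc))
            (fun h => hnbw (pvSkipWS_subset _ _ h)),
          pvSkipWS_eq_lstrip _ hdbw hnbw]
      exact pvStrip_append_ws b w hws
    rw [hurl]
    split <;> simp
  | false =>
    simp

-- pvBLoop on a newline-free input computes one line
theorem pvBLoop_no_nl (cs : List Char) (hn : '\n' ∉ cs) : pvBLoop cs = pvHandleLine cs := by
  by_cases hcs : cs = []
  · subst hcs; rw [pvBLoop_nil]; rfl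
  · rw [pvBLoop, dif_neg hcs]
    have hn0 : '\n' ∉ pvSkipWS cs := fun h => hn (pvSkipWS_subset cs _ h)
    split
    · next ak hm =>
      have hnak : '\n' ∉ pvSkipWS ak := by
        intro h
        rw [pvMatchKey_eq] at hm
        split at hm
        · have : ak = (pvSkipWS cs).drop pvKEY.length := (Option.some.inj hm).symm
          exact hn0 (List.drop_subset _ _ (this ▸ pvSkipWS_subset ak _ h))
        · exact absurd hm (by simp)
      simp only [pvScanUrl_no_nl _ hnak, pvBLoop_nil, List.append_nil]
      unfold pvHandleLine
      rw [hm]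
      rfl
    · next hm =>
      rw [pvDropLine_no_nl _ hn0, pvBLoop_nil]
      unfold pvHandleLine
      rw [hm]
      rfl

-- pvBLoop consumes exactly one line per iteration
theorem pvBLoop_step (t rest : List Char) (hnt : '\n' ∉ t) :
    pvBLoop (t ++ '\n' :: rest) = pvHandleLine t ++ pvBLoop rest := by
  have hne : t ++ '\n' :: rest ≠ [] := by simp
  rw [pvBLoop, dif_neg hne]
  have hskip : pvSkipWS (t ++ '\n' :: rest) = pvSkipWS t ++ '\n' :: rest :=
    pvSkipWS_append_nl t rest
  have hnl0 : '\n' ∉ pvSkipWS t := fun h => hnt (pvSkipWS_subset t _ h)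
  have hlowc : PySem.Chars.lowerChar '\n' = '\n' := by decide
  have hlow : PySem.Chars.lower (pvSkipWS t ++ '\n' :: rest)
      = PySem.Chars.lower (pvSkipWS t) ++ '\n' :: PySem.Chars.lower rest := by
    simp only [PySem.Chars.lower, List.map_append, List.map_cons, hlowc]
  have hknl : ('\n' : Char) ∉ pvKEY := by decide
  have hmkey : pvMatchKey pvKEY (pvSkipWS (t ++ '\n' :: rest))
      = if pvKEY.isPrefixOf (PySem.Chars.lower (pvSkipWS t))
        then some ((pvSkipWS t).drop pvKEY.length ++ '\n' :: rest) else none := by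
    rw [hskip, pvMatchKey_eq, hlow, pvPrefix_append_nl _ _ _ hknl]
    cases hc : pvKEY.isPrefixOf (PySem.Chars.lower (pvSkipWS t)) with
    | true =>
      rw [if_pos rfl, if_pos rfl]
      have hlen : pvKEY.length ≤ (pvSkipWS t).length := by
        have h1 := List.IsPrefix.length_le (List.isPrefixOf_iff_prefix.mp hc)
        simpa [PySem.Chars.lower] using h1
      rw [List.drop_append_of_le_length hlen]
    | false =>
      simp
  split
  · next ak hm =>
    rw [hmkey] at hm
    cases hc : pvKEY.isPrefixOf (PySem.Chars.lower (pvSkipWS t)) with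
    | true =>
      rw [hc, if_pos rfl] at hm
      have hak : ak = (pvSkipWS t).drop pvKEY.length ++ '\n' :: rest :=
        (Option.some.inj hm).symm
      subst hak
      have hnd : '\n' ∉ (pvSkipWS t).drop pvKEY.length :=
        fun h => hnl0 (List.drop_subset _ _ h)
      have hnsd : '\n' ∉ pvSkipWS ((pvSkipWS t).drop pvKEY.length) :=
        fun h => hnd (pvSkipWS_subset _ _ h)
      rw [pvSkipWS_append_nl]
      simp only [pvScanUrl_append _ hnsd rest]
      unfold pvHandleLine
      rw [pvMatchKey_eq, hc, if_pos rfl]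
      simp only [Option.elim]
    | false =>
      rw [hc] at hm
      exact absurd hm (by simp)
  · next hm =>
    rw [hmkey] at hm
    cases hc : pvKEY.isPrefixOf (PySem.Chars.lower (pvSkipWS t)) with
    | true =>
      rw [hc, if_pos rfl] at hm; exact absurd hm (by simp)
    | false =>
      rw [hskip, pvDropLine_append _ hnl0 rest]
      unfold pvHandleLine
      rw [pvMatchKey_eq, hc]
      simp

theorem pvMain : ∀ (n : Nat) (cs : List Char), cs.length ≤ n →
    (∀ c ∈ cs, pvDomChar c = true) → ∀ (acc : List String),
    (pvLines cs).foldl pvALine acc = acc ++ pvBLoop cs := by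
  intro n
  induction n with
  | zero =>
    intro cs hlen hd acc
    have hcs : cs = [] := List.length_eq_zero_iff.mp (Nat.le_zero.mp hlen)
    subst hcs
    have h1 : pvLines [] = [[]] := rfl
    rw [h1]
    simp only [List.foldl_cons, List.foldl_nil]
    rw [pvALine_eq [] acc (by simp) (by simp)]
    have h2 : pvHandleLine [] = [] := rfl
    rw [h2, pvBLoop_nil]
  | succ m ih =>
    intro cs hlen hd acc
    by_cases hnl : ('\n' : Char) ∈ cs
    · obtain ⟨t, rest, rfl, hnt⟩ := pvNlSplit cs hnl
      rw [pvLines_append t hnt rest]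
      rw [List.foldl_cons]
      rw [pvALine_eq t acc (fun c hc => hd c (List.mem_append_left _ hc)) hnt]
      rw [ih rest (by simp at hlen; omega)
          (fun c hc => hd c (List.mem_append_right _ (List.mem_cons_of_mem _ hc)))]
      rw [pvBLoop_step t rest hnt]
      simp [List.append_assoc]
    · rw [pvLines_no_nl cs hnl]
      simp only [List.foldl_cons, List.foldl_nil]
      rw [pvALine_eq cs acc hd hnl, pvBLoop_no_nl cs hnl]

-- ===== VERDICT (by name: the statement is the Claim_ definition above) =====
theorem extract_all_sitemaps_from_robots_py_spec :
    Claim_equal_extract_all_sitemaps_from_robots_py := by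
  intro rc hdom
  unfold Spec_extract_all_sitemaps_from_robots_py
  unfold extract_all_sitemaps_from_robots_py extract_all_sitemaps_from_robots_py_alt
  rw [pvSplitOn_eq_pvLines]
  have hd : ∀ c ∈ rc.toList, pvDomChar c = true := by
    unfold Dom_extract_all_sitemaps_from_robots_py pvDomStr at hdom
    exact fun c hc => List.all_eq_true.mp hdom c hc
  rw [pvMain rc.toList.length rc.toList le_rfl hd []]
  rfl
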